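-- pv_equiv track=rewrite | github.com/luisariasspire/channel-config | populate_per_pair_elevations.py | categorize_pls
-- ===== SOURCE A (Python) =====
-- def categorize_pls(pls):
--     """Categorize pls into low, medium, high by tertiles"""
--     sorted_pls = sorted(pls)
--     low_thresh = sorted_pls[len(pls)//3]
--     high_thresh = sorted_pls[2*len(pls)//3]
--
--     categories = []
--     for p in pls:
--         if p <= low_thresh:
--             categories.append("low")
--         elif p >= high_thresh:
--             categories.append("high")
--         else:
--             categories.append("medium")
--     return categories
-- ===== SOURCE B (Python) =====
-- def _select(xs, k):
--     """k-th smallest (0-based) via three-way quickselect (no full sort)."""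
--     p = xs[len(xs) // 2]
--     lt = [x for x in xs if x < p]
--     if k < len(lt):
--         return _select(lt, k)
--     eq = sum(1 for x in xs if x == p)
--     if k < len(lt) + eq:
--         return p
--     return _select([x for x in xs if x > p], k - len(lt) - eq)
--
--
-- def categorize_pls(pls):
--     n = len(pls)
--     low_thresh = _select(pls, n // 3)
--     high_thresh = _select(pls, 2 * n // 3)
--     return ["low" if p <= low_thresh
--             else "high" if p >= high_thresh
--             else "medium"
--             for p in pls]
-- ===== Notes on version B (the rewrite author's own statement) =====
-- stated objective: alternative
-- what changed: B replaces the full sort with a three-way quickselect that extracts just the two tertile order statistics, then classifies in one comprehension pass.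
-- outside the precondition, e.g. on categorize_pls([]): A raises IndexError, B raises IndexError
import Mathlib
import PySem

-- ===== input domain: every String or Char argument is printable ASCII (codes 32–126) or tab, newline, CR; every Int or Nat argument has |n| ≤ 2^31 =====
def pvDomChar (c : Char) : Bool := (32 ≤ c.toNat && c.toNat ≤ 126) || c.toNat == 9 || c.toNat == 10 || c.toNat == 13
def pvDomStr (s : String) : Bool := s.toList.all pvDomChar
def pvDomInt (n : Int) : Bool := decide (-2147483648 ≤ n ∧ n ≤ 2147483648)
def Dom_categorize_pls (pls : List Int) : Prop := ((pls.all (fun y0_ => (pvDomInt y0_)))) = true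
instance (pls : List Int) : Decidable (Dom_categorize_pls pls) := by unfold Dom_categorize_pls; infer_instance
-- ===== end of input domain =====

-- B replaces A's full sort by a three-way quickselect for the two tertile order
-- statistics, then classifies in a single map pass (alternative algorithm).

-- ===== PORT A =====
def categorize_pls (pls : List Int) : List String :=
  let sorted_pls := PySem.List.sorted pls (fun x => x) false
  match PySem.List.pyGet? sorted_pls (PySem.Int.floordiv (pls.length : Int) 3),
        PySem.List.pyGet? sorted_pls (PySem.Int.floordiv (2 * (pls.length : Int)) 3) with
  | some low_thresh, some high_thresh =>
      pls.foldl (fun categories p =>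
        categories ++ [if p ≤ low_thresh then "low"
                       else if p ≥ high_thresh then "high"
                       else "medium"]) []
  | _, _ => []    -- IndexError (only on pls = []): excluded by Pre_

-- ===== PORT B =====
-- termination helper for pvSelect (cited by decreasing_by)
theorem pvFilterLt (l : List Int) (p : Int) (q : Int → Bool) (hp : p ∈ l)
    (hq : q p = false) : (l.filter q).length < l.length := by
  rw [List.length_filter_lt_length_iff_exists]
  exact ⟨p, hp, by simp [hq]⟩

theorem pvPivotMem (x : Int) (t : List Int) :
    (x :: t).getD ((x :: t).length / 2) x ∈ x :: t := by
  rw [List.getD_eq_getElem (x :: t) x (by simp; omega)]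
  exact List.getElem_mem _

-- three-way quickselect: k-th smallest of xs (xs[0] on [] raises in Python: Pre_ excludes [])
def pvSelect : List Int → Nat → Int
  | [], _ => 0
  | x :: t, k =>
    let p := (x :: t).getD ((x :: t).length / 2) x
    let lt := (x :: t).filter (fun y => decide (y < p))
    if k < lt.length then pvSelect lt k
    else
      let eqc := ((x :: t).filter (fun y => decide (y = p))).length
      if k < lt.length + eqc then p
      else pvSelect ((x :: t).filter (fun y => decide (p < y))) (k - lt.length - eqc)
termination_by xs _ => xs.length
decreasing_by
  · exact pvFilterLt _ _ _ (pvPivotMem x t) (by simp)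
  · exact pvFilterLt _ _ _ (pvPivotMem x t) (by simp)

def categorize_pls_alt (pls : List Int) : List String :=
  let n := pls.length
  let low_thresh := pvSelect pls (n / 3)
  let high_thresh := pvSelect pls (2 * n / 3)
  pls.map (fun p => if p ≤ low_thresh then "low"
                    else if p ≥ high_thresh then "high"
                    else "medium")

-- ===== PRECONDITION & SPEC =====
-- Pre_ excludes only the empty list, on which A raises IndexError (sorted_pls[0] of []).
def Pre_categorize_pls (pls : List Int) : Prop := pls ≠ []
instance (pls : List Int) : Decidable (Pre_categorize_pls pls) := by unfold Pre_categorize_pls; infer_instance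
def pvWitness_categorize_pls : List Int := ([1, 5, 9])

def Spec_categorize_pls (pls : List Int) (out : List String) : Prop := out = categorize_pls_alt pls
instance (pls : List Int) (out : List String) : Decidable (Spec_categorize_pls pls out) := by unfold Spec_categorize_pls; infer_instance

-- ===== CLAIM =====
def Claim_equal_categorize_pls : Prop := ∀ (pls : List Int), Dom_categorize_pls pls → Pre_categorize_pls pls → Spec_categorize_pls pls (categorize_pls pls)

-- ===== LEMMAS AND PROOFS =====

-- the three filters by <p, =p, >p are a permutation of the list
theorem pvPerm3 (xs : List Int) (p : Int) :
    (xs.filter (fun y => decide (y < p)) ++ xs.filter (fun y => decide (y = p))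
      ++ xs.filter (fun y => decide (p < y))).Perm xs := by
  induction xs with
  | nil => simp
  | cons x t ih =>
    rcases lt_trichotomy x p with h | h | h
    · simpa [List.filter_cons, h, h.ne, not_lt.mpr h.le] using ih.cons x
    · subst h
      have hxL : (x :: t).filter (fun y => decide (y < x)) = t.filter (fun y => decide (y < x)) := by
        simp
      have hxE : (x :: t).filter (fun y => decide (y = x)) = x :: t.filter (fun y => decide (y = x)) := by
        simp
      have hxG : (x :: t).filter (fun y => decide (x < y)) = t.filter (fun y => decide (x < y)) := by
        simp
      rw [hxL, hxE, hxG, List.append_assoc, List.cons_append]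
      refine List.perm_middle.trans (List.Perm.cons x ?_)
      rw [← List.append_assoc]
      exact ih
    · have hxG : (x :: t).filter (fun y => decide (p < y)) = x :: t.filter (fun y => decide (p < y)) := by
        simp [h]
      have hxL : (x :: t).filter (fun y => decide (y < p)) = t.filter (fun y => decide (y < p)) := by
        simp [not_lt.mpr h.le]
      have hxE : (x :: t).filter (fun y => decide (y = p)) = t.filter (fun y => decide (y = p)) := by
        simp [h.ne']
      rw [hxL, hxE, hxG]
      exact (List.perm_middle.trans (ih.cons x))

-- sorted xs splits at a pivot into sorted(<p) ++ (=p) ++ sorted(>p)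
theorem pvSortedPartition (xs : List Int) (p : Int) :
    PySem.List.sorted xs (fun x => x) false =
      PySem.List.sorted (xs.filter (fun y => decide (y < p))) (fun x => x) false
      ++ xs.filter (fun y => decide (y = p))
      ++ PySem.List.sorted (xs.filter (fun y => decide (p < y))) (fun x => x) false := by
  apply PySem.List.sorted_id_eq_of_perm_of_pairwise
  · exact (((PySem.List.sorted_perm _ _ _).append (List.Perm.refl _)).append
      (PySem.List.sorted_perm _ _ _)).trans (pvPerm3 xs p)
  · have hL : ∀ a ∈ PySem.List.sorted (xs.filter (fun y => decide (y < p))) (fun x => x) false, a < p := by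
      intro a ha
      have := (PySem.List.mem_sorted _ _ _ _).1 ha
      simpa using (List.mem_filter.1 this).2
    have hE : ∀ a ∈ xs.filter (fun y => decide (y = p)), a = p := by
      intro a ha; simpa using (List.mem_filter.1 ha).2
    have hG : ∀ a ∈ PySem.List.sorted (xs.filter (fun y => decide (p < y))) (fun x => x) false, p < a := by
      intro a ha
      have := (PySem.List.mem_sorted _ _ _ _).1 ha
      simpa using (List.mem_filter.1 this).2
    rw [List.pairwise_append, List.pairwise_append]
    refine ⟨⟨PySem.List.sorted_pairwise _ _, ?_, ?_⟩, PySem.List.sorted_pairwise _ _, ?_⟩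
    · exact List.pairwise_of_forall_mem_list
        (fun a ha b hb => le_of_eq (by rw [hE a ha, hE b hb]))
    · intro a ha b hb
      rw [hE b hb]
      exact (hL a ha).le
    · intro a ha b hb
      rcases List.mem_append.1 ha with ha | ha
      · exact ((hL a ha).trans (hG b hb)).le
      · rw [hE a ha]
        exact (hG b hb).le

-- unfolding lemma for pvSelect on a nonempty list
theorem pvSelect_cons (x : Int) (t : List Int) (k : Nat)
    (p : Int) (hp : p = (x :: t).getD ((x :: t).length / 2) x) :
    pvSelect (x :: t) k =
      if k < ((x :: t).filter (fun y => decide (y < p))).length then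
        pvSelect ((x :: t).filter (fun y => decide (y < p))) k
      else if k < ((x :: t).filter (fun y => decide (y < p))).length
              + ((x :: t).filter (fun y => decide (y = p))).length then p
      else pvSelect ((x :: t).filter (fun y => decide (p < y)))
             (k - ((x :: t).filter (fun y => decide (y < p))).length
                - ((x :: t).filter (fun y => decide (y = p))).length) := by
  subst hp
  rw [pvSelect]

-- quickselect computes the k-th element of the sorted list
theorem pvSelect_sorted : ∀ (n : Nat) (xs : List Int) (k : Nat), xs.length ≤ n → k < xs.length →
    pvSelect xs k = (PySem.List.sorted xs (fun x => x) false).getD k 0 := by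
  intro n
  induction n with
  | zero => intro xs k h hk; omega
  | succ n ih =>
    intro xs k h hk
    match xs with
    | [] => simp at hk
    | x :: t =>
      obtain ⟨p, hp⟩ : ∃ p, p = (x :: t).getD ((x :: t).length / 2) x := ⟨_, rfl⟩
      obtain ⟨L, hLdef⟩ : ∃ L, (x :: t).filter (fun y => decide (y < p)) = L := ⟨_, rfl⟩
      obtain ⟨E, hEdef⟩ : ∃ E, (x :: t).filter (fun y => decide (y = p)) = E := ⟨_, rfl⟩
      obtain ⟨G, hGdef⟩ : ∃ G, (x :: t).filter (fun y => decide (p < y)) = G := ⟨_, rfl⟩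
      have hLlt : L.length < (x :: t).length := by
        rw [← hLdef]; exact pvFilterLt _ _ _ (hp ▸ pvPivotMem x t) (by simp)
      have hGlt : G.length < (x :: t).length := by
        rw [← hGdef]; exact pvFilterLt _ _ _ (hp ▸ pvPivotMem x t) (by simp)
      have hlen : L.length + E.length + G.length = (x :: t).length := by
        have := (pvPerm3 (x :: t) p).length_eq
        rw [hLdef, hEdef, hGdef] at this
        simp only [List.length_append] at this
        omega
      have hEp : ∀ a ∈ E, a = p := by
        intro a ha
        rw [← hEdef] at ha
        simpa using (List.mem_filter.1 ha).2
      rw [pvSelect_cons x t k p hp, hLdef, hEdef, hGdef,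
        pvSortedPartition (x :: t) p, hLdef, hEdef, hGdef]
      have hsL : (PySem.List.sorted L (fun x => x) false).length = L.length :=
        PySem.List.length_sorted _ _ _
      split_ifs with h1 h2
      · -- k < L.length
        rw [List.getD_append (PySem.List.sorted L (fun x => x) false ++ E)
          (PySem.List.sorted G (fun x => x) false) 0 k
          (by simp [PySem.List.length_sorted]; omega)]
        rw [List.getD_append (PySem.List.sorted L (fun x => x) false) E 0 k
          (by simp [PySem.List.length_sorted]; omega)]
        exact ih L k (by simp at hLlt h ⊢; omega) h1
      · -- L.length ≤ k < L.length + E.length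
        rw [List.getD_append (PySem.List.sorted L (fun x => x) false ++ E)
          (PySem.List.sorted G (fun x => x) false) 0 k
          (by simp [PySem.List.length_sorted]; omega)]
        rw [List.getD_append_right (PySem.List.sorted L (fun x => x) false) E 0 k
          (by simp [PySem.List.length_sorted]; omega)]
        rw [hsL]
        have hkE : k - L.length < E.length := by omega
        rw [List.getD_eq_getElem E 0 hkE]
        exact (hEp _ (List.getElem_mem hkE)).symm
      · -- k ≥ L.length + E.length
        rw [List.getD_append_right (PySem.List.sorted L (fun x => x) false ++ E)
          (PySem.List.sorted G (fun x => x) false) 0 k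
          (by simp [PySem.List.length_sorted]; omega)]
        rw [List.length_append, hsL]
        rw [← Nat.sub_sub k L.length E.length]
        have hkG : k - L.length - E.length < G.length := by simp at hk hlen; omega
        exact ih G (k - L.length - E.length) (by simp at hGlt h ⊢; omega) hkG

-- ===== VERDICT =====
theorem categorize_pls_spec : Claim_equal_categorize_pls := by
  intro pls hdom hpre
  unfold Spec_categorize_pls
  have hn : 0 < pls.length := by
    cases pls with
    | nil => exact absurd rfl hpre
    | cons a t => simp
  have h1 : PySem.Int.floordiv (pls.length : Int) 3 = ((pls.length / 3 : Nat) : Int) := by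
    exact_mod_cast PySem.Int.floordiv_natCast pls.length 3
  have h2 : PySem.Int.floordiv (2 * (pls.length : Int)) 3 = ((2 * pls.length / 3 : Nat) : Int) := by
    exact_mod_cast PySem.Int.floordiv_natCast (2 * pls.length) 3
  have hlo : pls.length / 3 < pls.length := by omega
  have hhi : 2 * pls.length / 3 < pls.length := by omega
  have hslen : (PySem.List.sorted pls (fun x => x) false).length = pls.length :=
    PySem.List.length_sorted _ _ _
  have e1 : PySem.List.pyGet? (PySem.List.sorted pls (fun x => x) false) ((pls.length / 3 : Nat) : Int)
      = some ((PySem.List.sorted pls (fun x => x) false).getD (pls.length / 3) 0) := by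
    rw [PySem.List.pyGet?_natCast, List.getElem?_eq_getElem (by omega), List.getD_eq_getElem _ _ (by omega)]
  have e2 : PySem.List.pyGet? (PySem.List.sorted pls (fun x => x) false) ((2 * pls.length / 3 : Nat) : Int)
      = some ((PySem.List.sorted pls (fun x => x) false).getD (2 * pls.length / 3) 0) := by
    rw [PySem.List.pyGet?_natCast, List.getElem?_eq_getElem (by omega), List.getD_eq_getElem _ _ (by omega)]
  show categorize_pls pls = categorize_pls_alt pls
  unfold categorize_pls categorize_pls_alt
  simp only [h1, h2, e1, e2]
  rw [PySem.List.foldl_append_singleton_eq_map]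
  rw [pvSelect_sorted pls.length pls (pls.length / 3) (le_refl _) hlo,
      pvSelect_sorted pls.length pls (2 * pls.length / 3) (le_refl _) hhi]
  simp
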